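-- pv_equiv track=rewrite | github.com/diemvs/hse_practice | app.py | tools_after_visit
-- ===== SOURCE A (Python) =====
-- from collections import Counter
--
-- def tools_after_visit(before, after):
--     before_counter = Counter(before)
--     after_counter = Counter(after)
--
--     brought = {}
--     took_away = {}
--
--     # Find out which tools were brought
--     for tool, count in after_counter.items():
--         if count > before_counter[tool]:
--             brought[tool] = count - before_counter[tool]
--
--     # Find out which tools were taken away
--     for tool, count in before_counter.items():
--         if count > after_counter[tool]:
--             took_away[tool] = count - after_counter[tool]
--
--     return {
--         "brought": dict(brought),
--         "took_away": dict(took_away)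
--     }
-- ===== SOURCE B (Python) =====
-- def tools_after_visit(before, after):
--     # Cancellation instead of counting: match each item of `after` against a working
--     # copy of `before`; the unmatched leftovers on each side are exactly the diffs.
--     remaining = list(before)
--     extra = []
--     for t in after:
--         if t in remaining:
--             remaining.remove(t)
--         else:
--             extra.append(t)
--     brought = {}
--     for t in after:
--         if t not in brought and t in extra:
--             brought[t] = extra.count(t)
--     took_away = {}
--     for t in before:
--         if t not in took_away and t in remaining:
--             took_away[t] = remaining.count(t)
--     return {"brought": brought, "took_away": took_away}
-- ===== Notes on version B (the rewrite author's own statement) =====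
-- stated objective: alternative
-- what changed: Replaces A's Counter-based count-and-compare (build two frequency counters, filter each for positive differences) by multiset cancellation: each item of `after` is matched against and removed from a working copy of `before`, and the unmatched leftovers on each side (`extra` and `remaining`) are aggregated into the two result dicts in first-occurrence order.
import Mathlib
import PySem

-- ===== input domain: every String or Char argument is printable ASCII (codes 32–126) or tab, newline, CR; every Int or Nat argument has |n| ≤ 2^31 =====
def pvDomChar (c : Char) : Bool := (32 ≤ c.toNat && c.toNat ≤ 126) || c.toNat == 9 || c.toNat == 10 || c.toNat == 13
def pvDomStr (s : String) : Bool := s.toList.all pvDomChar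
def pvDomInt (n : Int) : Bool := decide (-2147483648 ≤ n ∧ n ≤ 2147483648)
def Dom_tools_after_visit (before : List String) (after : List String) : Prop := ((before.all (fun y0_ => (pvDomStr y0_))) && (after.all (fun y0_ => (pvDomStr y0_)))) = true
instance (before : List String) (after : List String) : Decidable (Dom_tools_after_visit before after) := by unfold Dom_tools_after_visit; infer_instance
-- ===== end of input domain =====

-- B replaces A's Counter-based count-and-compare by multiset cancellation: each item of
-- `after` is matched against a working copy of `before`, and the unmatched leftovers on
-- each side are aggregated into the two result dicts (alternative decomposition, not faster).

-- ===== PORT A =====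
def tools_after_visit (before : List String) (after : List String) : List (String × List (String × Int)) :=
  let before_counter := PySem.Dict.counter before
  let after_counter := PySem.Dict.counter after
  let brought := after_counter.items.foldl
    (fun (b : PySem.Dict String Int) p =>
      if before_counter.getD p.1 0 < p.2 then b.insert p.1 (p.2 - before_counter.getD p.1 0) else b)
    PySem.Dict.empty
  let took_away := before_counter.items.foldl
    (fun (b : PySem.Dict String Int) p =>
      if after_counter.getD p.1 0 < p.2 then b.insert p.1 (p.2 - after_counter.getD p.1 0) else b)
    PySem.Dict.empty
  [("brought", brought.items), ("took_away", took_away.items)]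

-- ===== PORT B =====
-- `remaining.remove(t)` is guarded by `t in remaining`, so `remove?` is `some`;
-- `.getD p.1` only discharges the impossible `none` case.
def tools_after_visit_alt (before : List String) (after : List String) : List (String × List (String × Int)) :=
  let p := after.foldl
    (fun (p : List String × List String) t =>
      if p.1.contains t then ((PySem.List.remove? p.1 t).getD p.1, p.2) else (p.1, p.2 ++ [t]))
    (before, [])
  let remaining := p.1
  let extra := p.2
  let brought := after.foldl
    (fun (b : PySem.Dict String Int) t =>
      if !b.contains t && extra.contains t then b.insert t ((extra.count t : Int)) else b)
    PySem.Dict.empty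
  let took_away := before.foldl
    (fun (b : PySem.Dict String Int) t =>
      if !b.contains t && remaining.contains t then b.insert t ((remaining.count t : Int)) else b)
    PySem.Dict.empty
  [("brought", brought.items), ("took_away", took_away.items)]

-- ===== PRECONDITION & SPEC =====
def Spec_tools_after_visit (before : List String) (after : List String) (out : List (String × List (String × Int))) : Prop := out = tools_after_visit_alt before after
instance (before : List String) (after : List String) (out : List (String × List (String × Int))) : Decidable (Spec_tools_after_visit before after out) := by unfold Spec_tools_after_visit; infer_instance

-- ===== CLAIM (what is proved, stated in full; the proofs are below) =====
def Claim_equal_tools_after_visit : Prop := ∀ (before : List String) (after : List String), Dom_tools_after_visit before after → Spec_tools_after_visit before after (tools_after_visit before after)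

-- ===== LEMMAS AND PROOFS =====

-- counts of `remaining` and `extra` after B's cancellation loop
theorem cancel_counts (l : List String) : ∀ (r e : List String) (t : String),
    ((l.foldl
      (fun (p : List String × List String) t =>
        if p.1.contains t then ((PySem.List.remove? p.1 t).getD p.1, p.2) else (p.1, p.2 ++ [t]))
      (r, e)).1.count t = r.count t - min (r.count t) (l.count t))
  ∧ ((l.foldl
      (fun (p : List String × List String) t =>
        if p.1.contains t then ((PySem.List.remove? p.1 t).getD p.1, p.2) else (p.1, p.2 ++ [t]))
      (r, e)).2.count t = e.count t + (l.count t - min (r.count t) (l.count t))) := by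
  induction l with
  | nil => intro r e t; simp
  | cons x xs ih =>
    intro r e t
    simp only [List.foldl_cons]
    by_cases hx : x ∈ r
    · have hc : r.contains x = true := List.contains_iff_mem.mpr hx
      rw [hc]
      simp only [if_true, PySem.List.remove?_eq_some_erase r x hx, Option.getD_some]
      have h1 : 1 ≤ r.count x := List.count_pos_iff.mpr hx
      rcases eq_or_ne t x with rfl | ht
      · obtain ⟨i1, i2⟩ := ih (r.erase t) e t
        constructor
        · rw [i1, List.count_erase_self, List.count_cons_self]; omega
        · rw [i2, List.count_erase_self, List.count_cons_self]; omega
      · obtain ⟨i1, i2⟩ := ih (r.erase x) e t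
        constructor
        · rw [i1, List.count_erase_of_ne ht, List.count_cons_of_ne (Ne.symm ht)]
        · rw [i2, List.count_erase_of_ne ht, List.count_cons_of_ne (Ne.symm ht)]
    · have hc : r.contains x = false := by simpa [List.contains_iff_mem] using hx
      rw [hc]
      have h0 : r.count x = 0 := List.count_eq_zero.mpr hx
      simp only [Bool.false_eq_true, if_false]
      rcases eq_or_ne t x with rfl | ht
      · obtain ⟨i1, i2⟩ := ih r (e ++ [t]) t
        simp only [List.count_append, List.count_cons_self, List.count_nil] at i1 i2 ⊢
        exact ⟨by rw [i1]; omega, by rw [i2]; omega⟩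
      · obtain ⟨i1, i2⟩ := ih r (e ++ [x]) t
        simp only [List.count_append, List.count_cons_of_ne (Ne.symm ht), List.count_nil] at i1 i2 ⊢
        exact ⟨by rw [i1], by rw [i2]; omega⟩

-- A's filtered foldl over distinct fresh keys appends one item per accepted key
theorem afold_items (c : String → Prop) [DecidablePred c] (v : String → Int) :
    ∀ (l : List String) (b : PySem.Dict String Int),
      (∀ t ∈ l, b.contains t = false) → l.Nodup →
      (l.foldl (fun b t => if c t then b.insert t (v t) else b) b).items
        = b.items ++ (l.filter (fun t => decide (c t))).map (fun t => (t, v t)) := by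
  intro l
  induction l with
  | nil => intro b _ _; simp
  | cons x xs ih =>
    intro b hfresh hnd
    simp only [List.foldl_cons]
    by_cases hc : c x
    · rw [if_pos hc]
      have hx : b.contains x = false := hfresh x (List.mem_cons_self ..)
      have hfresh' : ∀ t ∈ xs, (b.insert x (v x)).contains t = false := by
        intro t ht
        rw [PySem.Dict.contains_insert]
        have : t ≠ x := fun h => (List.nodup_cons.mp hnd).1 (h ▸ ht)
        simp [this, hfresh t (List.mem_cons_of_mem _ ht)]
      rw [ih (b.insert x (v x)) hfresh' (List.nodup_cons.mp hnd).2,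
          PySem.Dict.items_insert_of_not_contains b (v x) hx]
      simp [hc]
    · rw [if_neg hc, ih b (fun t ht => hfresh t (List.mem_cons_of_mem _ ht)) (List.nodup_cons.mp hnd).2]
      simp [hc]

-- B's first-occurrence-guarded foldl over the raw list builds the same filtered item list
theorem bfold_items (c : String → Bool) (v : String → Int) :
    ∀ (l s : List String) (b : PySem.Dict String Int),
      b.items = (s.filter c).map (fun t => (t, v t)) →
      (l.foldl (fun b t => if !b.contains t && c t then b.insert t (v t) else b) b).items
        = ((PySem.Set.update s l).filter c).map (fun t => (t, v t)) := by
  intro l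
  induction l with
  | nil =>
    intro s b h
    have hu : PySem.Set.update s [] = s := rfl
    rw [List.foldl_nil, hu]; exact h
  | cons x xs ih =>
    intro s b h
    have hup : PySem.Set.update s (x :: xs) = PySem.Set.update (PySem.Set.add s x) xs := rfl
    have hkeys : b.keys = s.filter c := by
      simp only [PySem.Dict.keys, h, List.map_map]
      rw [show ((fun (p : String × Int) => p.1) ∘ (fun t => (t, v t))) = id from rfl, List.map_id]
    simp only [List.foldl_cons, hup]
    by_cases hs : x ∈ s
    · have hadd : PySem.Set.add s x = s := by
        simp [PySem.Set.add, List.contains_eq_mem, hs]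
      by_cases hc : c x = true
      · have hcon : b.contains x = true := by
          rw [PySem.Dict.contains_eq_decide_mem_keys, hkeys]
          simp [List.mem_filter, hs, hc]
        rw [hcon]
        simpa [hadd] using ih s b h
      · have hcx : c x = false := by simpa using hc
        rw [hcx]
        simpa [hadd] using ih s b h
    · have hadd : PySem.Set.add s x = s ++ [x] := by
        simp [PySem.Set.add, List.contains_eq_mem, hs]
      have hcon : b.contains x = false := by
        rw [PySem.Dict.contains_eq_decide_mem_keys, hkeys]
        simp [List.mem_filter, hs]
      rw [hcon]
      by_cases hc : c x = true
      · rw [hadd]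
        have h' : (b.insert x (v x)).items = ((s ++ [x]).filter c).map (fun t => (t, v t)) := by
          rw [PySem.Dict.items_insert_of_not_contains b (v x) hcon, h]
          simp [List.filter_append, hc]
        simpa [hc] using ih (s ++ [x]) (b.insert x (v x)) h'
      · have hcx : c x = false := by simpa using hc
        rw [hadd, hcx]
        have h' : b.items = ((s ++ [x]).filter c).map (fun t => (t, v t)) := by
          rw [h]; simp [List.filter_append, hcx]
        simpa using ih (s ++ [x]) b h'

-- ===== VERDICT (by name: the statement is the Claim_ definition above) =====
theorem tools_after_visit_spec : Claim_equal_tools_after_visit := by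
  intro before after _
  show tools_after_visit before after = tools_after_visit_alt before after
  unfold tools_after_visit tools_after_visit_alt
  simp only [PySem.Dict.items_counter, List.foldl_map, PySem.Dict.getD_counter]
  simp only [List.cons.injEq, Prod.mk.injEq, true_and, and_true]
  -- counts of the cancellation loop's two components
  have hrem : ∀ t, ((after.foldl
      (fun (p : List String × List String) t =>
        if p.1.contains t then ((PySem.List.remove? p.1 t).getD p.1, p.2) else (p.1, p.2 ++ [t]))
      (before, [])).1).count t = before.count t - min (before.count t) (after.count t) := by
    intro t; simpa using (cancel_counts after before [] t).1
  have hext : ∀ t, ((after.foldl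
      (fun (p : List String × List String) t =>
        if p.1.contains t then ((PySem.List.remove? p.1 t).getD p.1, p.2) else (p.1, p.2 ++ [t]))
      (before, [])).2).count t = after.count t - min (before.count t) (after.count t) := by
    intro t; simpa using (cancel_counts after before [] t).2
  constructor
  · -- brought
    rw [afold_items (fun t => (before.count t : Int) < (after.count t : Int))
        (fun t => (after.count t : Int) - (before.count t : Int)) (PySem.Set.ofList after)
        PySem.Dict.empty (by intro t _; exact PySem.Dict.contains_empty _) (PySem.Set.nodup_ofList after),
        bfold_items _ _ after [] PySem.Dict.empty rfl]
    have hset : PySem.Set.update [] after = PySem.Set.ofList after := rfl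
    rw [hset]
    have hemp : (PySem.Dict.empty : PySem.Dict String Int).items = [] := rfl
    rw [hemp, List.nil_append]
    have hf : (PySem.Set.ofList after).filter
        (fun t => ((after.foldl
          (fun (p : List String × List String) t =>
            if p.1.contains t then ((PySem.List.remove? p.1 t).getD p.1, p.2) else (p.1, p.2 ++ [t]))
          (before, [])).2).contains t)
        = (PySem.Set.ofList after).filter
            (fun t => decide ((before.count t : Int) < (after.count t : Int))) := by
      apply List.filter_congr
      intro t _
      rw [List.contains_eq_mem]
      apply decide_eq_decide.mpr
      rw [← List.count_pos_iff, hext t]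
      omega
    rw [hf]
    apply List.map_congr_left
    intro t ht
    have hlt : (before.count t : Int) < (after.count t : Int) := by
      simpa using (List.mem_filter.mp ht).2
    have := hext t
    simp only [Prod.mk.injEq, true_and]
    omega
  · -- took_away
    rw [afold_items (fun t => (after.count t : Int) < (before.count t : Int))
        (fun t => (before.count t : Int) - (after.count t : Int)) (PySem.Set.ofList before)
        PySem.Dict.empty (by intro t _; exact PySem.Dict.contains_empty _) (PySem.Set.nodup_ofList before),
        bfold_items _ _ before [] PySem.Dict.empty rfl]
    have hset : PySem.Set.update [] before = PySem.Set.ofList before := rfl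
    rw [hset]
    have hemp : (PySem.Dict.empty : PySem.Dict String Int).items = [] := rfl
    rw [hemp, List.nil_append]
    have hf : (PySem.Set.ofList before).filter
        (fun t => ((after.foldl
          (fun (p : List String × List String) t =>
            if p.1.contains t then ((PySem.List.remove? p.1 t).getD p.1, p.2) else (p.1, p.2 ++ [t]))
          (before, [])).1).contains t)
        = (PySem.Set.ofList before).filter
            (fun t => decide ((after.count t : Int) < (before.count t : Int))) := by
      apply List.filter_congr
      intro t _
      rw [List.contains_eq_mem]
      apply decide_eq_decide.mpr
      rw [← List.count_pos_iff, hrem t]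
      omega
    rw [hf]
    apply List.map_congr_left
    intro t ht
    have hlt : (after.count t : Int) < (before.count t : Int) := by
      simpa using (List.mem_filter.mp ht).2
    have := hrem t
    simp only [Prod.mk.injEq, true_and]
    omega
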